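-- pv_equiv track=rewrite | github.com/joaoflorentino/Polker-POO2-UFSC | ganhador.py | dois_pares
-- ===== SOURCE A (Python) =====
-- from collections import defaultdict
--
-- def dois_pares(mao):
--     '''Fucao que separa ocorrencia de Dois_Pares'''
--     valores = [i[0] for i in mao]
--     contaValor = defaultdict(lambda:0)
--     for v in valores:
--         contaValor[v] += 1
--     if sorted (contaValor.values()) == [1,2,2]:
--         return True
--     else:
--         return False
-- ===== SOURCE B (Python) =====
-- def dois_pares(mao):
--     '''Fucao que separa ocorrencia de Dois_Pares'''
--     valores = [v for v, _ in mao]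
--     distintos = set(valores)
--     return len(valores) == 5 and len(distintos) == 3 and all(valores.count(v) <= 2 for v in distintos)
-- ===== Notes on version B (the rewrite author's own statement) =====
-- stated objective: simpler
-- what changed: B drops A's frequency dict and sorted-values comparison and instead checks the arithmetic characterisation of a two-pair hand: exactly 5 cards, exactly 3 distinct values, and no value appearing more than twice.
import Mathlib
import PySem

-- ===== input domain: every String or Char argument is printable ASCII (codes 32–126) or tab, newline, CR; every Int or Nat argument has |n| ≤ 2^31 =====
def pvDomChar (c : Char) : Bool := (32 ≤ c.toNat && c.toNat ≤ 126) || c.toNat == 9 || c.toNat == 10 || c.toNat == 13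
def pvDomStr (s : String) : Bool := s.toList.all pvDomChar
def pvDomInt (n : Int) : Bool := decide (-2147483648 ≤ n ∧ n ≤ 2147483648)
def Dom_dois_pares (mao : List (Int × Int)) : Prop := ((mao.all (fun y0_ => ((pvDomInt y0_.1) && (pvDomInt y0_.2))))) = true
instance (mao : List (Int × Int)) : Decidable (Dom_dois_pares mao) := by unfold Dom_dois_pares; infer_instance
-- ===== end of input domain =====

-- B replaces A's frequency-dict + sorted-values comparison by an arithmetic characterisation
-- (5 cards, 3 distinct values, no value more than twice); objective: simpler.

-- ===== PORT A =====
def dois_pares (mao : List (Int × Int)) : Bool :=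
  let valores := mao.map (fun i => i.1)
  let contaValor := valores.foldl (fun d v => PySem.Dict.modify d v 0 (· + 1)) PySem.Dict.empty
  if PySem.List.sorted (PySem.Dict.values contaValor) (fun x => x) false = [(1 : Int), 2, 2] then true else false

-- ===== PORT B =====
def dois_pares_alt (mao : List (Int × Int)) : Bool :=
  let valores := mao.map (fun v => v.1)
  let distintos := PySem.Set.ofList valores
  decide (valores.length = 5) && decide (distintos.length = 3)
    && distintos.all (fun v => decide (valores.count v ≤ 2))

-- ===== PRECONDITION & SPEC =====
def Spec_dois_pares (mao : List (Int × Int)) (out : Bool) : Prop := out = dois_pares_alt mao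
instance (mao : List (Int × Int)) (out : Bool) : Decidable (Spec_dois_pares mao out) := by unfold Spec_dois_pares; infer_instance

-- ===== CLAIM (what is proved, stated in full; the proofs are below) =====
def Claim_equal_dois_pares : Prop := ∀ (mao : List (Int × Int)), Dom_dois_pares mao → Spec_dois_pares mao (dois_pares mao)

-- ===== LEMMAS AND PROOFS =====

-- the values of Counter(vs) are the counts of the distinct elements, in first-occurrence order
theorem counter_values (vs : List Int) :
    PySem.Dict.values (PySem.Dict.counter vs)
      = (PySem.Set.ofList vs).map (fun k => (vs.count k : Int)) := by
  have h := PySem.Dict.items_counter vs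
  simp [PySem.Dict.values, h]

-- the counts over the distinct elements sum to the length
theorem counts_sum (vs : List Int) :
    ((PySem.Set.ofList vs).map (fun k => vs.count k)).sum = vs.length := by
  have hperm : (PySem.List.dedup vs).Perm vs.dedup := by
    apply List.perm_of_nodup_nodup_toFinset_eq (PySem.Set.nodup_ofList vs) vs.nodup_dedup
    ext a; simp [PySem.Set.mem_ofList]
  calc ((PySem.Set.ofList vs).map (fun k => vs.count k)).sum
      = ((PySem.List.dedup vs).map (fun k => vs.count k)).sum := by simp
    _ = (vs.dedup.map (fun k => vs.count k)).sum := (hperm.map (fun k => vs.count k)).sum_eq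
    _ = vs.length := List.sum_map_count_dedup_eq_length vs

-- A's test "sorted counts = [1,2,2]" is B's arithmetic condition
theorem key_iff (vs : List Int) :
    PySem.List.sorted ((PySem.Set.ofList vs).map (fun k => (vs.count k : Int))) (fun x => x) false
        = [(1 : Int), 2, 2]
      ↔ (vs.length = 5 ∧ (PySem.Set.ofList vs).length = 3 ∧
          ∀ v ∈ PySem.Set.ofList vs, vs.count v ≤ 2) := by
  set s := PySem.Set.ofList vs with hs
  set l := s.map (fun k => (vs.count k : Int)) with hl
  have hsum : l.sum = (vs.length : Int) := by
    rw [hl]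
    have : s.map (fun k => (vs.count k : Int)) = (s.map (fun k => vs.count k)).map (Nat.cast) := by
      simp [List.map_map]
    rw [this, ← Nat.cast_list_sum, counts_sum]
  have hmem : ∀ x ∈ l, (1 : Int) ≤ x := by
    intro x hx
    rw [hl] at hx
    obtain ⟨k, hk, rfl⟩ := List.mem_map.mp hx
    have : 0 < vs.count k := List.count_pos_iff.mpr ((PySem.Set.mem_ofList _ _).mp hk)
    exact_mod_cast this
  constructor
  · intro h
    have hperm : l.Perm [(1 : Int), 2, 2] := by
      have := PySem.List.sorted_perm l (fun x => x) false
      rw [h] at this; exact this.symm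
    have hlen3 : l.length = 3 := hperm.length_eq
    have hsum5 : l.sum = 5 := by rw [hperm.sum_eq]; decide
    have hlen5 : vs.length = 5 := by
      have : (vs.length : Int) = 5 := by rw [← hsum, hsum5]
      exact_mod_cast this
    refine ⟨hlen5, by simpa [hl] using hlen3, ?_⟩
    intro v hv
    have hx : (vs.count v : Int) ∈ l := by
      rw [hl]; exact List.mem_map.mpr ⟨v, hv, rfl⟩
    have : (vs.count v : Int) ∈ [(1 : Int), 2, 2] := hperm.mem_iff.mp hx
    have h2 : (vs.count v : Int) ≤ 2 := by
      have h12 : (vs.count v : Int) = 1 ∨ (vs.count v : Int) = 2 := by simpa using this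
      omega
    exact_mod_cast h2
  · rintro ⟨hlen5, hcard, hle⟩
    have hlen3 : l.length = 3 := by simpa [hl] using hcard
    obtain ⟨a, b, c, habc⟩ := List.length_eq_three.mp hlen3
    have hub : ∀ x ∈ l, x ≤ (2 : Int) := by
      intro x hx
      rw [hl] at hx
      obtain ⟨k, hk, rfl⟩ := List.mem_map.mp hx
      exact_mod_cast hle k hk
    have ha1 : (1:Int) ≤ a := hmem a (by rw [habc]; simp)
    have hb1 : (1:Int) ≤ b := hmem b (by rw [habc]; simp)
    have hc1 : (1:Int) ≤ c := hmem c (by rw [habc]; simp)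
    have ha2 : a ≤ 2 := hub a (by rw [habc]; simp)
    have hb2 : b ≤ 2 := hub b (by rw [habc]; simp)
    have hc2 : c ≤ 2 := hub c (by rw [habc]; simp)
    have hs5 : a + (b + c) = 5 := by
      have := hsum; rw [habc, hlen5] at this; simpa using this
    have hcase : (a = 1 ∧ b = 2 ∧ c = 2) ∨ (a = 2 ∧ b = 1 ∧ c = 2) ∨ (a = 2 ∧ b = 2 ∧ c = 1) := by
      omega
    rw [habc]
    rcases hcase with ⟨rfl, rfl, rfl⟩ | ⟨rfl, rfl, rfl⟩ | ⟨rfl, rfl, rfl⟩ <;> decide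

-- ===== VERDICT (by name: the statement is the Claim_ definition above) =====
theorem dois_pares_spec : Claim_equal_dois_pares := by
  intro mao _
  unfold Spec_dois_pares dois_pares dois_pares_alt
  set vs := mao.map (fun i => i.1) with hvs
  have hcnt : vs.foldl (fun d v => PySem.Dict.modify d v 0 (· + 1)) PySem.Dict.empty
      = PySem.Dict.counter vs := (PySem.Dict.counter_eq_foldl vs).symm
  simp only [hcnt, counter_values]
  rw [Bool.eq_iff_iff]
  constructor
  · intro h
    split_ifs at h with hP
    · have hk := (key_iff vs).mp hP
      simp only [Bool.and_eq_true, decide_eq_true_eq, List.all_eq_true]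
      exact ⟨⟨hk.1, hk.2.1⟩, fun v hv => by simpa using hk.2.2 v hv⟩
  · intro h
    simp only [Bool.and_eq_true, decide_eq_true_eq, List.all_eq_true] at h
    have hP := (key_iff vs).mpr ⟨h.1.1, h.1.2, fun v hv => by simpa using h.2 v hv⟩
    simp [hP]
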